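-- pv_equiv track=rewrite | github.com/DevStarSJ/algorithmExercise | TopCoder/14.ColorfulBoxesAndBalls.SRM464.py | boxes_and_balls
-- ===== SOURCE A (Python) =====
-- def boxes_and_balls(num_red, num_blue, only_red, only_blue, both_colors):
--     init_score = num_red * only_red + num_blue * only_blue
--     change_count = min([num_red, num_blue])
--
--     if min([only_red, only_blue, both_colors]) == both_colors:
--         return init_score
--
--     scores = [(num_red - x) * only_red + (num_blue - x) * only_blue + 2 * x * both_colors
--                for x in range(1, change_count + 1)]\
--              + [init_score]
--
--     return max(scores)
-- ===== SOURCE B (Python) =====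
-- def boxes_and_balls(num_red, num_blue, only_red, only_blue, both_colors):
--     # Score as a function of mixed boxes x is linear: init + x * gain.
--     # The maximum over x in 0..min(num_red, num_blue) is therefore at an endpoint.
--     gain = 2 * both_colors - only_red - only_blue
--     return (num_red * only_red + num_blue * only_blue
--             + max(0, min(num_red, num_blue)) * max(0, gain))
-- ===== Notes on version B (the rewrite author's own statement) =====
-- stated objective: faster
-- what changed: The score is linear in the number of mixed boxes x, so B replaces A's enumeration of all x in 1..min(num_red,num_blue) by the closed form init + max(0,change_count)*max(0,slope).
import Mathlib
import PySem

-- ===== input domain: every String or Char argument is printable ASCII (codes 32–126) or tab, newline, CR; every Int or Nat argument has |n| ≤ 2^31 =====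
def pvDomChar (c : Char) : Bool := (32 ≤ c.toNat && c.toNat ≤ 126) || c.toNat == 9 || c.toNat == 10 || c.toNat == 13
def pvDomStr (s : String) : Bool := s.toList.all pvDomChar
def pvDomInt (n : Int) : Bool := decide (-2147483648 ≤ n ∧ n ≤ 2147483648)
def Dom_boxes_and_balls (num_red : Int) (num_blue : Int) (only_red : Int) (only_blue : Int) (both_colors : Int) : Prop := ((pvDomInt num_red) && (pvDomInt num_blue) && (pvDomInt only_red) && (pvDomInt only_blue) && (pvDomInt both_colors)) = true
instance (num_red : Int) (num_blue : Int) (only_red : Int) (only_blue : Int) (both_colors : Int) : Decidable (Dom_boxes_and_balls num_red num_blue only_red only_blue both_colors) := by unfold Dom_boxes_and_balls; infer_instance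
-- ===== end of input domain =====

-- ===== PORT A =====
-- Literal port of A: enumerate x = 1 .. change_count and take max(scores).
def boxes_and_balls (num_red : Int) (num_blue : Int) (only_red : Int) (only_blue : Int) (both_colors : Int) : Int :=
  let init_score := num_red * only_red + num_blue * only_blue
  let change_count := min num_red num_blue
  if min (min only_red only_blue) both_colors = both_colors then init_score
  else
    let scores := (PySem.List.pyRange 1 (change_count + 1) 1).map
        (fun x => (num_red - x) * only_red + (num_blue - x) * only_blue + 2 * x * both_colors)
      ++ [init_score]
    (PySem.List.max? scores (fun y => y)).getD 0  -- scores is nonempty, so max() cannot raise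

-- ===== PORT B =====
-- B: the score is linear in x, so the maximum sits at an endpoint (closed form, O(1)).
def boxes_and_balls_alt (num_red : Int) (num_blue : Int) (only_red : Int) (only_blue : Int) (both_colors : Int) : Int :=
  let gain := 2 * both_colors - only_red - only_blue
  num_red * only_red + num_blue * only_blue + max 0 (min num_red num_blue) * max 0 gain

-- ===== PRECONDITION & SPEC =====
def Spec_boxes_and_balls (num_red : Int) (num_blue : Int) (only_red : Int) (only_blue : Int) (both_colors : Int) (out : Int) : Prop := out = boxes_and_balls_alt num_red num_blue only_red only_blue both_colors
instance (num_red : Int) (num_blue : Int) (only_red : Int) (only_blue : Int) (both_colors : Int) (out : Int) : Decidable (Spec_boxes_and_balls num_red num_blue only_red only_blue both_colors out) := by unfold Spec_boxes_and_balls; infer_instance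

-- ===== CLAIM (what is proved, stated in full; the proofs are below) =====
def Claim_equal_boxes_and_balls : Prop := ∀ (num_red : Int) (num_blue : Int) (only_red : Int) (only_blue : Int) (both_colors : Int), Dom_boxes_and_balls num_red num_blue only_red only_blue both_colors → Spec_boxes_and_balls num_red num_blue only_red only_blue both_colors (boxes_and_balls num_red num_blue only_red only_blue both_colors)

-- ===== LEMMAS AND PROOFS =====

-- ===== VERDICT (by name: the statement is the Claim_ definition above) =====
-- Key lemma: the maximum of the linear scores init + x*g over x in 1..cc together with init
-- is the closed form init + max 0 cc * max 0 g.
theorem max_linear_scores (init g cc : Int) :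
    (PySem.List.max? ((PySem.List.pyRange 1 (cc + 1) 1).map (fun x => init + x * g) ++ [init])
      (fun y => y)).getD 0 = init + max 0 cc * max 0 g := by
  set L := (PySem.List.pyRange 1 (cc + 1) 1).map (fun x => init + x * g) ++ [init] with hL
  set B := init + max 0 cc * max 0 g with hB
  have hub : ∀ y ∈ L, y ≤ B := by
    intro y hy
    rcases List.mem_append.mp hy with h | h
    · rcases List.mem_map.mp h with ⟨x, hx, rfl⟩
      have hx' := (PySem.List.mem_pyRange_one).mp hx
      have h1 : 1 ≤ x := hx'.1
      have h2 : x ≤ cc := by omega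
      have hxg : x * g ≤ max 0 cc * max 0 g := by
        rcases le_or_gt g 0 with hg | hg
        · have : x * g ≤ 0 := mul_nonpos_of_nonneg_of_nonpos (by omega) hg
          have : (0:Int) ≤ max 0 cc * max 0 g :=
            mul_nonneg (le_max_left 0 cc) (le_max_left 0 g)
          omega
        · have hmc : max 0 cc = cc := max_eq_right (by omega)
          have hmg : max 0 g = g := max_eq_right (le_of_lt hg)
          rw [hmc, hmg]
          exact mul_le_mul_of_nonneg_right h2 (le_of_lt hg)
      omega
    · have : y = init := List.mem_singleton.mp h
      have : (0:Int) ≤ max 0 cc * max 0 g :=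
        mul_nonneg (le_max_left 0 cc) (le_max_left 0 g)
      omega
  have hmem : B ∈ L := by
    rcases le_or_gt cc 0 with hcc | hcc
    · have : max 0 cc = 0 := max_eq_left (by omega)
      have hBi : B = init := by rw [hB, this]; ring
      exact hBi ▸ List.mem_append_right _ (List.mem_singleton.mpr rfl)
    · rcases le_or_gt g 0 with hg | hg
      · have : max 0 g = 0 := max_eq_left (by omega)
        have hBi : B = init := by rw [hB, this]; ring
        exact hBi ▸ List.mem_append_right _ (List.mem_singleton.mpr rfl)
      · have hcm : cc ∈ PySem.List.pyRange 1 (cc + 1) 1 :=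
          (PySem.List.mem_pyRange_one).mpr ⟨by omega, by omega⟩
        have hBi : B = init + cc * g := by
          rw [hB, max_eq_right (le_of_lt hcc), max_eq_right (le_of_lt hg)]
        exact hBi ▸ List.mem_append_left _ (List.mem_map.mpr ⟨cc, hcm, rfl⟩)
  have hne : L ≠ [] := by simp [hL]
  obtain ⟨m, hm⟩ : ∃ m, PySem.List.max? L (fun y => y) = some m := by
    cases hmax : PySem.List.max? L (fun y => y) with
    | none => exact absurd ((PySem.List.max?_eq_none_iff _ _).mp hmax) hne
    | some m => exact ⟨m, rfl⟩
  have hmmem : m ∈ L := PySem.List.max?_mem hm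
  have h1 : m ≤ B := hub m hmmem
  have h2 : B ≤ m := PySem.List.max?_isMax hm B hmem
  rw [hm]
  simpa using le_antisymm h1 h2

theorem boxes_and_balls_spec : Claim_equal_boxes_and_balls := by
  intro nr nb r b c _
  unfold Spec_boxes_and_balls boxes_and_balls boxes_and_balls_alt
  simp only []
  set init := nr * r + nb * b with hinit
  set g := 2 * c - r - b with hg
  have hmap : (PySem.List.pyRange 1 (min nr nb + 1) 1).map
      (fun x => (nr - x) * r + (nb - x) * b + 2 * x * c)
      = (PySem.List.pyRange 1 (min nr nb + 1) 1).map (fun x => init + x * g) := by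
    apply List.map_congr_left
    intro x _
    rw [hinit, hg]; ring
  by_cases hmin : min (min r b) c = c
  · -- A returns early; both_colors ≤ only_red, only_blue, so the gain is nonpositive
    have hrc : c ≤ r := by
      have := min_le_left (min r b) c; have := min_le_left r b; omega
    have hbc : c ≤ b := by
      have := min_le_left (min r b) c; have := min_le_right r b; omega
    have hgle : g ≤ 0 := by omega
    rw [if_pos hmin]
    rw [max_eq_left hgle, mul_zero, add_zero]
  · rw [if_neg hmin, hmap, max_linear_scores]
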